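-- pv_equiv track=rewrite | github.com/nirajablockchain/testdiff | testcommit111.py | parse_diff
-- ===== SOURCE A (Python) =====
-- def parse_diff(diff):
--     file_diffs = diff.split("\ndiff")
--     file_diffs = [file_diffs[0]
--                   ] + ["\ndiff" + file_diff for file_diff in file_diffs[1:]]
--     chunked_file_diffs = []
--     for file_diff in file_diffs:
--         [head, *chunks] = file_diff.split("\n@@")
--         chunks = ["\n@@" + chunk for chunk in reversed(chunks)]
--         chunked_file_diffs.append((head, chunks))
--     return chunked_file_diffs
-- ===== SOURCE B (Python) =====
-- def parse_diff(diff):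
--     lines = diff.split("\n")
--
--     def close(head, groups, first):
--         prefix = "" if first else "\n"
--         return (prefix + "\n".join(head), ["\n" + "\n".join(g) for g in groups])
--
--     files = []
--     head, groups = [lines[0]], []
--     for line in lines[1:]:
--         if line.startswith("diff"):
--             files.append(close(head, groups, not files))
--             head, groups = [line], []
--         elif line.startswith("@@"):
--             groups.insert(0, [line])
--         elif groups:
--             groups[0].append(line)
--         else:
--             head.append(line)
--     files.append(close(head, groups, not files))
--     return files
-- ===== Notes on version B (the rewrite author's own statement) =====
-- stated objective: alternative
-- what changed: B replaces A's two-level substring splitting (first on the newline+diff separator, then per file on the newline+at-at separator, with re-prefixing and reversed() on the chunk list) by a single line-by-line state machine over the split-into-lines input that keeps a head buffer and chunk groups (prepending new chunks so no reversal is needed) and closes each file as it goes.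
import Mathlib
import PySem

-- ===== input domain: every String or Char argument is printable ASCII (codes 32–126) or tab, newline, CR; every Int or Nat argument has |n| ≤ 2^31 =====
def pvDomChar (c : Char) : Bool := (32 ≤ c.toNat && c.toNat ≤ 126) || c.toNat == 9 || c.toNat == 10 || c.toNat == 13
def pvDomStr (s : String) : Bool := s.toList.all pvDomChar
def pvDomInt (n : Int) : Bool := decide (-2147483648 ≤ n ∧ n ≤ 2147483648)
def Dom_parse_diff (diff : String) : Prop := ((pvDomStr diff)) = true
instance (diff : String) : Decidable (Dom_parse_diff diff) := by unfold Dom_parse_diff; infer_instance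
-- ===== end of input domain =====

-- ===== PORT A =====

-- B re-implements parse_diff as a single line-by-line state machine over the input split
-- into lines, instead of A's nested substring splits on the file/chunk separators;
-- objective: alternative (same exact return value, proved below).

-- ===== PORT A =====
-- Python A: split on the file separator, re-prefix it, then per file split on the chunk
-- separator; head = first part, chunks = prefixed parts of the reversed rest.
def parse_diff (diff : String) : List (String × List String) :=
  let file_diffs := PySem.Chars.splitOn diff.toList "\ndiff".toList
  let file_diffs2 := [file_diffs.headD []] ++
    (PySem.List.slice file_diffs (some 1) none).map (fun fd => "\ndiff".toList ++ fd)
  file_diffs2.foldl (fun acc fd =>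
    let parts := PySem.Chars.splitOn fd "\n@@".toList
    let head := parts.headD []
    let chunks := parts.tail
    let chunks2 := (chunks.reverse).map (fun chunk => "\n@@".toList ++ chunk)
    acc ++ [(String.ofList head, chunks2.map String.ofList)]) []


-- ===== PORT B =====
-- helpers of B: close() and the loop body of Source B's state machine
def pdClose (head : List (List Char)) (groups : List (List (List Char))) (first : Bool) :
    String × List String :=
  (String.ofList ((if first then [] else ['\n']) ++ PySem.Chars.join "\n".toList head),
   groups.map (fun g => String.ofList ('\n' :: PySem.Chars.join "\n".toList g)))

def pdStep (st : List (String × List String) × List (List Char) × List (List (List Char)))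
    (line : List Char) : List (String × List String) × List (List Char) × List (List (List Char)) :=
  if PySem.Chars.startswith line "diff".toList then
    (st.1 ++ [pdClose st.2.1 st.2.2 st.1.isEmpty], [line], [])
  else if PySem.Chars.startswith line "@@".toList then
    (st.1, st.2.1, [line] :: st.2.2)
  else
    match st.2.2 with
    | g :: gs => (st.1, st.2.1, (g ++ [line]) :: gs)
    | [] => (st.1, st.2.1 ++ [line], [])

def pdFinish (st : List (String × List String) × List (List Char) × List (List (List Char))) :
    List (String × List String) :=
  st.1 ++ [pdClose st.2.1 st.2.2 st.1.isEmpty]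

def parse_diff_alt (diff : String) : List (String × List String) :=
  let lines := PySem.Chars.splitOn diff.toList "\n".toList
  pdFinish ((lines.tail).foldl pdStep ([], [lines.headD []], []))


-- ===== PRECONDITION & SPEC =====
-- A is total (str.split never raises): no Pre_ needed.
def Spec_parse_diff (diff : String) (out : List (String × List String)) : Prop :=
  out = parse_diff_alt diff
instance (diff : String) (out : List (String × List String)) : Decidable (Spec_parse_diff diff out) := by
  unfold Spec_parse_diff; infer_instance

-- ===== CLAIM =====
def Claim_equal_parse_diff : Prop :=
  ∀ (diff : String), Dom_parse_diff diff → Spec_parse_diff diff (parse_diff diff)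

-- ===== LEMMAS AND PROOFS =====
def fsp (c0 : Char) (w : List Char) (l : List Char) (cur : List Char) : List (List Char) :=
  match l with
  | [] => [cur.reverse]
  | c :: rest =>
    if (c0 :: w).isPrefixOf (c :: rest) then
      cur.reverse :: fsp c0 w (rest.drop w.length) []
    else fsp c0 w rest (c :: cur)
  termination_by l.length
  decreasing_by
  · simp
  · simp

theorem go_eq (c0 : Char) (w : List Char) :
    ∀ (fuel : Nat) (l cur : List Char) (acc : List (List Char)) (h : l.length < fuel),
    PySem.Chars.splitOn.go (c0 :: w) fuel l cur acc = acc.reverse ++ fsp c0 w l cur := by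
  intro fuel
  induction fuel with
  | zero => omega
  | succ n ih =>
    intro l cur acc h
    match l with
    | [] => rw [PySem.Chars.splitOn.go.eq_def]; simp [fsp]
    | c :: rest =>
      rw [PySem.Chars.splitOn.go.eq_def]
      simp only [fsp]
      split
      · rw [ih _ _ _ (by simp at h ⊢; omega)]
        simp
      · rw [ih _ _ _ (by simp at h ⊢; omega)]

theorem splitOn_eq_fsp (c0 : Char) (w : List Char) (l : List Char) :
    PySem.Chars.splitOn l (c0 :: w) = fsp c0 w l [] := by
  rw [PySem.Chars.splitOn, go_eq]
  · simp
  · omega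

def pdLines (l : List Char) : List (List Char) := fsp '\n' [] l []

theorem fsp_nil_shape : ∀ (l cur : List Char),
    fsp '\n' [] l cur = (cur.reverse ++ (pdLines l).headD []) :: (pdLines l).tail := by
  intro l
  induction l with
  | nil => intro cur; simp [fsp, pdLines]
  | cons c rest ih =>
    intro cur
    by_cases hc : c = '\n'
    · subst hc
      simp only [fsp, pdLines, List.isPrefixOf, BEq.rfl, List.isPrefixOf_nil_left,
        Bool.and_true, if_pos]
      simp [fsp]
    · have hp : (['\n'].isPrefixOf (c :: rest)) = false := by
        simp [List.isPrefixOf]; exact fun h => absurd h.symm hc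
      simp only [pdLines, fsp, hp, Bool.false_eq_true, if_neg, List.drop_zero]
      rw [ih (c :: cur), ih [c]]
      simp

theorem pdLines_head : ∀ (l : List Char), (pdLines l).headD [] = l.takeWhile (· ≠ '\n') := by
  intro l
  induction l with
  | nil => simp [pdLines, fsp]
  | cons c rest ih =>
    by_cases hc : c = '\n'
    · subst hc
      simp only [pdLines, fsp]
      simp [List.takeWhile]
    · have hp : (['\n'].isPrefixOf (c :: rest)) = false := by
        simp [List.isPrefixOf]; exact fun h => absurd h.symm hc
      simp only [pdLines, fsp, hp, Bool.false_eq_true, if_false]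
      rw [fsp_nil_shape]
      simpa [List.takeWhile, hc, pdLines, List.headD_eq_head?_getD] using ih

theorem pdLines_cons_shape (l : List Char) :
    pdLines l = (pdLines l).headD [] :: (pdLines l).tail := by
  have := fsp_nil_shape l []
  simpa [pdLines] using this

theorem fsp_nil_append (a : List Char) (ha : '\n' ∉ a) :
    ∀ (t cur : List Char), fsp '\n' [] (a ++ t) cur = fsp '\n' [] t (a.reverse ++ cur) := by
  induction a with
  | nil => simp
  | cons c a' ih =>
    intro t cur
    have hc : c ≠ '\n' := by intro h; exact ha (by simp [h])
    have hp : (['\n'].isPrefixOf (c :: (a' ++ t))) = false := by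
      simp [List.isPrefixOf]; exact fun h => absurd h.symm hc
    simp only [List.cons_append, fsp, hp, Bool.false_eq_true, if_false]
    rw [ih (by intro h; exact ha (by simp [h]))]
    simp

theorem pdLines_no_nl (x : List Char) (hx : '\n' ∉ x) : pdLines x = [x] := by
  induction x with
  | nil => simp [pdLines, fsp]
  | cons c r ih =>
    have hc : c ≠ '\n' := by intro h; exact hx (by simp [h])
    have hp : (['\n'].isPrefixOf (c :: r)) = false := by
      simp [List.isPrefixOf]; exact fun h => absurd h.symm hc
    have hr := ih (by intro h; exact hx (by simp [h]))
    simp only [pdLines, fsp, hp, Bool.false_eq_true, if_false]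
    rw [fsp_nil_shape]
    simp [show fsp '\n' [] r [] = [r] from hr, pdLines, hr]

theorem pdLines_newline_cons (t : List Char) : pdLines ('\n' :: t) = [] :: pdLines t := by
  simp [pdLines, fsp, List.isPrefixOf]

theorem pdLines_join (L : List (List Char)) (hL : L ≠ []) (hnl : ∀ x ∈ L, '\n' ∉ x) :
    pdLines (List.intercalate ['\n'] L) = L := by
  induction L with
  | nil => simp at hL
  | cons x L' ih =>
    match L' with
    | [] =>
      simp [List.intercalate]
      exact pdLines_no_nl x (hnl x (by simp))
    | y :: L'' =>
      have : List.intercalate ['\n'] (x :: y :: L'') = x ++ '\n' :: List.intercalate ['\n'] (y :: L'') := rfl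
      rw [this, pdLines, fsp_nil_append x (hnl x (by simp)), ]
      have h2 : fsp '\n' [] ('\n' :: List.intercalate ['\n'] (y :: L'')) (x.reverse ++ []) =
          x :: pdLines (List.intercalate ['\n'] (y :: L'')) := by
        simp [fsp, List.isPrefixOf, pdLines]
      rw [h2, ih (by simp) (by intro z hz; exact hnl z (by simp [hz]))]

theorem pdLines_nl : ∀ (l cur : List Char), (∀ c ∈ cur, c ≠ '\n') →
    ∀ x ∈ fsp '\n' [] l cur, '\n' ∉ x := by
  intro l
  induction l with
  | nil =>
    intro cur hcur x hx
    simp [fsp] at hx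
    subst hx
    intro h
    exact hcur _ (by simpa using h) rfl
  | cons c rest ih =>
    intro cur hcur x hx
    by_cases hc : c = '\n'
    · subst hc
      simp only [fsp, List.isPrefixOf, BEq.rfl, List.isPrefixOf_nil_left, Bool.and_true,
        if_pos, List.drop_zero, List.mem_cons] at hx
      rcases hx with h | h
      · subst h; intro h'; exact hcur _ (by simpa using h') rfl
      · exact ih [] (by simp) x h
    · have hp : (['\n'].isPrefixOf (c :: rest)) = false := by
        simp [List.isPrefixOf]; exact fun h => absurd h.symm hc
      simp only [fsp, hp, Bool.false_eq_true, if_false] at hx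
      refine ih (c :: cur) ?_ x hx
      intro a ha
      rcases List.mem_cons.1 ha with h | h
      · subst h; exact hc
      · exact hcur a h

theorem prefix_takeWhile (w : List Char) : ∀ (t : List Char), '\n' ∉ w → w <+: t →
    w <+: t.takeWhile (· ≠ '\n') := by
  induction w with
  | nil => simp
  | cons a w' ih =>
    intro t hw h
    rcases h with ⟨s, hs⟩
    subst hs
    have ha : a ≠ '\n' := by intro h'; exact hw (by simp [h'])
    simp only [List.cons_append, List.takeWhile_cons, ne_eq, ha, not_false_eq_true,
      decide_true, if_true]
    have := ih (w' ++ s) (by intro h'; exact hw (by simp [h'])) ⟨s, rfl⟩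
    exact List.cons_prefix_cons.2 ⟨rfl, this⟩

theorem prefix_head_iff (w : List Char) (hw : '\n' ∉ w) (t : List Char) :
    w <+: (pdLines t).headD [] ↔ w <+: t := by
  rw [pdLines_head]
  constructor
  · intro h; exact h.trans (List.takeWhile_prefix _)
  · intro h; exact prefix_takeWhile w t hw h

def regr (w : List Char) (L : List (List Char)) : List (List Char) :=
  match L with
  | [] => []
  | [x] => [x]
  | x :: y :: r =>
    if w.isPrefixOf y then x :: regr w (y.drop w.length :: r)
    else regr w ((x ++ '\n' :: y) :: r)
  termination_by L.length

theorem fsp_cons_pos (c0 : Char) (w : List Char) (c : Char) (rest cur : List Char)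
    (h : (c0 :: w).isPrefixOf (c :: rest) = true) :
    fsp c0 w (c :: rest) cur = cur.reverse :: fsp c0 w (rest.drop w.length) [] := by
  rw [fsp]; simp [h]

theorem fsp_cons_neg (c0 : Char) (w : List Char) (c : Char) (rest cur : List Char)
    (h : (c0 :: w).isPrefixOf (c :: rest) = false) :
    fsp c0 w (c :: rest) cur = fsp c0 w rest (c :: cur) := by
  rw [fsp]; simp [h]

theorem regr_two_pos (w : List Char) (x y : List Char) (r : List (List Char))
    (h : w.isPrefixOf y = true) :
    regr w (x :: y :: r) = x :: regr w (y.drop w.length :: r) := by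
  rw [regr]; simp [h]

theorem regr_two_neg (w : List Char) (x y : List Char) (r : List (List Char))
    (h : w.isPrefixOf y = false) :
    regr w (x :: y :: r) = regr w ((x ++ '\n' :: y) :: r) := by
  rw [regr]; simp [h]

theorem fsp_regr (w : List Char) (hw : '\n' ∉ w) :
    ∀ (n : Nat) (l cur : List Char), l.length ≤ n →
    fsp '\n' w l cur = regr w (fsp '\n' [] l cur) := by
  intro n
  induction n with
  | zero =>
    intro l cur h
    have : l = [] := by cases l <;> simp_all
    subst this
    simp [fsp, regr]
  | succ n ih =>
    intro l cur h
    match l with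
    | [] => simp [fsp, regr]
    | c :: rest =>
      have hlen : rest.length ≤ n := by simp at h; omega
      by_cases hc : c = '\n'
      · subst hc
        have hnil : (['\n'] : List Char).isPrefixOf ('\n' :: rest) = true := by
          simp [List.isPrefixOf]
        rw [fsp_cons_pos '\n' [] '\n' rest cur hnil]
        simp only [List.length_nil, List.drop_zero]
        by_cases hm : w <+: rest
        · have hm' : w.isPrefixOf rest = true := List.isPrefixOf_iff_prefix.2 hm
          have hcond : (('\n' :: w).isPrefixOf ('\n' :: rest)) = true := by
            simp [List.isPrefixOf, hm']
          rw [fsp_cons_pos '\n' w '\n' rest cur hcond]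
          rw [ih _ _ (by rw [List.length_drop]; omega)]
          obtain ⟨u, hu⟩ := hm
          have hdrop : rest.drop w.length = u := by rw [← hu]; simp
          have hrest : pdLines rest = (w ++ (pdLines u).headD []) :: (pdLines u).tail := by
            rw [← hu]
            show fsp '\n' [] (w ++ u) [] = _
            rw [fsp_nil_append w hw, fsp_nil_shape]
            simp [pdLines]
          rw [hdrop]
          rw [show fsp '\n' [] rest [] = pdLines rest from rfl, hrest]
          rw [regr_two_pos _ _ _ _ (List.isPrefixOf_iff_prefix.2 ⟨_, rfl⟩)]
          rw [List.drop_left, ← pdLines_cons_shape]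
          rfl
        · have hm' : w.isPrefixOf rest = false := by
            rw [Bool.eq_false_iff]; intro hh; exact hm (List.isPrefixOf_iff_prefix.1 hh)
          have hcond : (('\n' :: w).isPrefixOf ('\n' :: rest)) = false := by
            simp [List.isPrefixOf, hm']
          rw [fsp_cons_neg '\n' w '\n' rest cur hcond]
          rw [ih _ _ hlen]
          rw [fsp_nil_shape rest ('\n' :: cur)]
          rw [show fsp '\n' [] rest [] = pdLines rest from rfl, pdLines_cons_shape rest]
          have hnp : w.isPrefixOf ((pdLines rest).headD []) = false := by
            rw [Bool.eq_false_iff]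
            intro hh
            exact hm ((prefix_head_iff w hw rest).1 (List.isPrefixOf_iff_prefix.1 hh))
          rw [regr_two_neg _ _ _ _ hnp]
          simp
      · have hp1 : (('\n' :: w).isPrefixOf (c :: rest)) = false := by
          simp [List.isPrefixOf]; intro hh; exact absurd hh.symm hc
        have hp2 : ((['\n'] : List Char).isPrefixOf (c :: rest)) = false := by
          simp [List.isPrefixOf]; intro hh; exact absurd hh.symm hc
        rw [fsp_cons_neg '\n' w c rest cur hp1, fsp_cons_neg '\n' [] c rest cur hp2]
        exact ih _ _ hlen

def gsp (w : List Char) : List (List Char) → List (List Char) × List (List Char × List (List Char))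
  | [] => ([], [])
  | y :: r =>
    let p := gsp w r
    if w.isPrefixOf y then ([], (y, p.1) :: p.2) else (y :: p.1, p.2)

theorem gsp_prefix (w : List Char) : ∀ (r : List (List Char)) (q : List Char × List (List Char)),
    q ∈ (gsp w r).2 → w <+: q.1 := by
  intro r
  induction r with
  | nil => simp [gsp]
  | cons y r' ih =>
    intro q hq
    simp only [gsp] at hq
    split at hq
    · rename_i h
      rcases List.mem_cons.1 hq with h' | h'
      · subst h'; exact List.isPrefixOf_iff_prefix.1 h
      · exact ih q h'
    · exact ih q hq

theorem gsp_clean1 (w : List Char) : ∀ (r : List (List Char)) (x : List Char),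
    x ∈ (gsp w r).1 → w.isPrefixOf x = false := by
  intro r
  induction r with
  | nil => simp [gsp]
  | cons y r' ih =>
    intro x hx
    simp only [gsp] at hx
    split at hx
    · simp at hx
    · rcases List.mem_cons.1 hx with h' | h'
      · subst h'
        rename_i h
        cases hb : w.isPrefixOf x with
        | false => rfl
        | true => exact absurd hb h
      · exact ih x h'

theorem gsp_clean2 (w : List Char) : ∀ (r : List (List Char)) (q : List Char × List (List Char)),
    q ∈ (gsp w r).2 → ∀ x ∈ q.2, w.isPrefixOf x = false := by
  intro r
  induction r with
  | nil => simp [gsp]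
  | cons y r' ih =>
    intro q hq
    simp only [gsp] at hq
    split at hq
    · rcases List.mem_cons.1 hq with h' | h'
      · subst h'; intro x hx; exact gsp_clean1 w r' x hx
      · exact ih q h'
    · exact ih q hq

theorem gsp_mem1 (w : List Char) : ∀ (r : List (List Char)) (x : List Char),
    x ∈ (gsp w r).1 → x ∈ r := by
  intro r
  induction r with
  | nil => simp [gsp]
  | cons y r' ih =>
    intro x hx
    simp only [gsp] at hx
    split at hx
    · simp at hx
    · rcases List.mem_cons.1 hx with h' | h'
      · subst h'; simp
      · exact List.mem_cons_of_mem _ (ih x h')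

theorem gsp_mem2 (w : List Char) : ∀ (r : List (List Char)) (q : List Char × List (List Char)),
    q ∈ (gsp w r).2 → q.1 ∈ r ∧ ∀ x ∈ q.2, x ∈ r := by
  intro r
  induction r with
  | nil => simp [gsp]
  | cons y r' ih =>
    intro q hq
    simp only [gsp] at hq
    split at hq
    · rcases List.mem_cons.1 hq with h' | h'
      · subst h'
        exact ⟨by simp, fun x hx => List.mem_cons_of_mem _ (gsp_mem1 w r' x hx)⟩
      · obtain ⟨h1, h2⟩ := ih q h'
        exact ⟨List.mem_cons_of_mem _ h1, fun x hx => List.mem_cons_of_mem _ (h2 x hx)⟩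
    · obtain ⟨h1, h2⟩ := ih q hq
      exact ⟨List.mem_cons_of_mem _ h1, fun x hx => List.mem_cons_of_mem _ (h2 x hx)⟩

theorem gsp_decomp (w : List Char) : ∀ (r : List (List Char)),
    r = (gsp w r).1 ++ (gsp w r).2.flatMap (fun q => q.1 :: q.2) := by
  intro r
  induction r with
  | nil => simp [gsp]
  | cons y r' ih =>
    simp only [gsp]
    split
    · simp only [List.nil_append, List.flatMap_cons, List.cons_append]
      exact congrArg _ ih
    · simp only [List.cons_append]
      exact congrArg _ ih

theorem join_merge (v y : List Char) (t : List (List Char)) :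
    List.intercalate ['\n'] ((v ++ '\n' :: y) :: t) = v ++ '\n' :: List.intercalate ['\n'] (y :: t) := by
  cases t with
  | nil => simp [List.intercalate]
  | cons z t' =>
    show (v ++ '\n' :: y) ++ '\n' :: List.intercalate ['\n'] (z :: t') = _
    simp
    rfl

theorem regr_gsp (w : List Char) : ∀ (n : Nat) (r : List (List Char)) (v : List Char), r.length ≤ n →
    regr w (v :: r) = List.intercalate ['\n'] (v :: (gsp w r).1) ::
      ((gsp w r).2).map (fun q => List.intercalate ['\n'] ((q.1.drop w.length) :: q.2)) := by
  intro n
  induction n with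
  | zero =>
    intro r v h
    have : r = [] := by cases r <;> simp_all
    subst this
    simp [regr, gsp, List.intercalate]
  | succ n ih =>
    intro r v h
    match r with
    | [] => simp [regr, gsp, List.intercalate]
    | y :: r' =>
      have hlen : r'.length ≤ n := by simp at h; omega
      by_cases hm : w.isPrefixOf y = true
      · rw [regr_two_pos _ _ _ _ hm, ih _ _ hlen]
        simp only [gsp, hm, if_true]
        simp [List.intercalate]
      · have hm' : w.isPrefixOf y = false := by
          cases hb : w.isPrefixOf y with
          | false => rfl
          | true => exact absurd hb hm
        rw [regr_two_neg _ _ _ _ hm', ih _ _ hlen]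
        simp only [gsp, hm', Bool.false_eq_true, if_false]
        rw [join_merge]
        rfl

theorem inner_cons (u : List (List Char)) :
    ∀ (files : List (String × List String)) (head : List (List Char)) (g : List (List Char))
      (gs : List (List (List Char))),
    (∀ x ∈ u, ("diff".toList).isPrefixOf x = false) →
    u.foldl pdStep (files, head, g :: gs) =
      (files, head,
        (((gsp "@@".toList u).2.map (fun q => q.1 :: q.2)).reverse) ++ ((g ++ (gsp "@@".toList u).1) :: gs)) := by
  induction u with
  | nil => intro files head g gs _; simp [gsp]
  | cons y u' ih =>
    intro files head g gs hclean
    have hd : ("diff".toList).isPrefixOf y = false := hclean y (by simp)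
    have hdP : ¬ ("diff".toList <+: y) := fun hh => by
      rw [List.isPrefixOf_iff_prefix.2 hh] at hd; cases hd
    have hstep : pdStep (files, head, g :: gs) y =
        if ("@@".toList).isPrefixOf y then (files, head, [y] :: g :: gs)
        else (files, head, (g ++ [y]) :: gs) := by
      simp [pdStep, PySem.Chars.startswith]
      exact fun hh => absurd hh hdP
    rw [List.foldl_cons, hstep]
    by_cases ha : ("@@".toList).isPrefixOf y = true
    · rw [if_pos ha]
      rw [ih files head [y] (g :: gs) (fun x hx => hclean x (by simp [hx]))]
      simp only [gsp, ha, if_true]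
      simp
    · have ha' : ("@@".toList).isPrefixOf y = false := by
        cases hb : ("@@".toList).isPrefixOf y with
        | false => rfl
        | true => exact absurd hb ha
      rw [if_neg ha]
      rw [ih files head (g ++ [y]) gs (fun x hx => hclean x (by simp [hx]))]
      simp only [gsp, ha', Bool.false_eq_true, if_false]
      simp

theorem inner_nil (u : List (List Char)) :
    ∀ (files : List (String × List String)) (head : List (List Char)),
    (∀ x ∈ u, ("diff".toList).isPrefixOf x = false) →
    u.foldl pdStep (files, head, []) =
      (files, head ++ (gsp "@@".toList u).1,
        ((gsp "@@".toList u).2.map (fun q => q.1 :: q.2)).reverse) := by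
  induction u with
  | nil => intro files head _; simp [gsp]
  | cons y u' ih =>
    intro files head hclean
    have hd : ("diff".toList).isPrefixOf y = false := hclean y (by simp)
    have hdP : ¬ ("diff".toList <+: y) := fun hh => by
      rw [List.isPrefixOf_iff_prefix.2 hh] at hd; cases hd
    have hstep : pdStep (files, head, []) y =
        if ("@@".toList).isPrefixOf y then (files, head, [[y]])
        else (files, head ++ [y], []) := by
      simp [pdStep, PySem.Chars.startswith]
      exact fun hh => absurd hh hdP
    rw [List.foldl_cons, hstep]
    by_cases ha : ("@@".toList).isPrefixOf y = true
    · rw [if_pos ha]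
      rw [inner_cons u' files head [y] [] (fun x hx => hclean x (by simp [hx]))]
      simp only [gsp, ha, if_true]
      simp
    · have ha' : ("@@".toList).isPrefixOf y = false := by
        cases hb : ("@@".toList).isPrefixOf y with
        | false => rfl
        | true => exact absurd hb ha
      rw [if_neg ha]
      rw [ih files (head ++ [y]) (fun x hx => hclean x (by simp [hx]))]
      simp only [gsp, ha', Bool.false_eq_true, if_false]
      simp

theorem outer (GS : List (List Char × List (List Char))) :
    ∀ (files : List (String × List String)) (head : List (List Char))
      (groups : List (List (List Char))),
    (∀ q ∈ GS, ("diff".toList).isPrefixOf q.1 = true ∧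
               ∀ x ∈ q.2, ("diff".toList).isPrefixOf x = false) →
    pdFinish ((GS.flatMap (fun q => q.1 :: q.2)).foldl pdStep (files, head, groups)) =
      files ++ [pdClose head groups files.isEmpty] ++
        GS.map (fun q => pdClose (q.1 :: (gsp "@@".toList q.2).1)
          (((gsp "@@".toList q.2).2.map (fun p => p.1 :: p.2)).reverse) false) := by
  induction GS with
  | nil => intro files head groups _; simp [pdFinish]
  | cons q GS' ih =>
    intro files head groups hq
    obtain ⟨hq1, hq2⟩ := hq q (by simp)
    have hstep : pdStep (files, head, groups) q.1 =
        (files ++ [pdClose head groups files.isEmpty], [q.1], []) := by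
      simp [pdStep, PySem.Chars.startswith]
      exact fun hh => absurd (List.isPrefixOf_iff_prefix.1 hq1) hh
    rw [List.flatMap_cons, List.cons_append, List.foldl_cons, hstep, List.foldl_append]
    rw [inner_nil q.2 _ _ hq2]
    rw [ih _ _ _ (fun p hp => hq p (by simp [hp]))]
    have hne : (files ++ [pdClose head groups files.isEmpty]).isEmpty = false := by simp
    rw [hne]
    simp

theorem pre_join (w y : List Char) (t : List (List Char)) (h : w <+: y) :
    w ++ List.intercalate ['\n'] ((y.drop w.length) :: t) = List.intercalate ['\n'] (y :: t) := by
  obtain ⟨u, rfl⟩ := h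
  rw [List.drop_left]
  cases t with
  | nil => simp [List.intercalate]
  | cons z t' =>
    show w ++ (u ++ '\n' :: List.intercalate ['\n'] (z :: t')) =
      (w ++ u) ++ '\n' :: List.intercalate ['\n'] (z :: t')
    simp

theorem diff_not_at (y : List Char) (h : ("diff".toList) <+: y) :
    ("@@".toList).isPrefixOf y = false := by
  obtain ⟨u, rfl⟩ := h
  rfl

def aFile (fd : List Char) : String × List String :=
  (String.ofList ((PySem.Chars.splitOn fd "\n@@".toList).headD []),
   ((((PySem.Chars.splitOn fd "\n@@".toList).tail.reverse).map
      (fun chunk => "\n@@".toList ++ chunk)).map String.ofList))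

theorem A_map (diff : String) :
    parse_diff diff =
      ([(PySem.Chars.splitOn diff.toList "\ndiff".toList).headD []] ++
        ((PySem.Chars.splitOn diff.toList "\ndiff".toList).tail).map
          (fun fd => "\ndiff".toList ++ fd)).map aFile := by
  rw [parse_diff]
  simp only [PySem.List.slice_from_one]
  rw [PySem.List.foldl_append_singleton_eq_map]
  rfl

theorem splitAt_char (fd : List Char) :
    PySem.Chars.splitOn fd "\n@@".toList = regr "@@".toList (pdLines fd) := by
  rw [show "\n@@".toList = '\n' :: "@@".toList from rfl]
  rw [splitOn_eq_fsp, fsp_regr _ (by decide) (fd.length) fd [] le_rfl]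
  rfl

theorem chunks_eq (GS2 : List (List Char × List (List Char)))
    (hpre : ∀ q ∈ GS2, ("@@".toList) <+: q.1) :
    ((GS2.map (fun q => List.intercalate ['\n'] ((q.1.drop ("@@".toList).length) :: q.2))).reverse.map
        (fun chunk => "\n@@".toList ++ chunk)).map String.ofList =
      ((GS2.map (fun p => p.1 :: p.2)).reverse).map
        (fun g => String.ofList ('\n' :: PySem.Chars.join "\n".toList g)) := by
  rw [← List.map_reverse, ← List.map_reverse]
  rw [List.map_map, List.map_map, List.map_map]
  apply List.map_congr_left
  intro q hq
  have hq' : q ∈ GS2 := List.mem_reverse.1 hq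
  simp only [Function.comp]
  rw [show ("\n@@".toList : List Char) = '\n' :: "@@".toList from rfl]
  rw [List.cons_append, pre_join _ _ _ (hpre q hq')]
  rfl

theorem aFile_core (v : List Char) (u : List (List Char))
    (hv : '\n' ∉ v) (hu : ∀ x ∈ u, '\n' ∉ x) :
    aFile (List.intercalate ['\n'] (v :: u)) =
      pdClose (v :: (gsp "@@".toList u).1)
        (((gsp "@@".toList u).2.map (fun p => p.1 :: p.2)).reverse) true := by
  rw [aFile, splitAt_char]
  rw [pdLines_join (v :: u) (by simp) (by intro x hx; rcases List.mem_cons.1 hx with h|h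
                                          · subst h; exact hv
                                          · exact hu x h)]
  rw [regr_gsp _ u.length u v le_rfl]
  rw [pdClose]
  simp only [List.headD_cons, List.tail_cons, if_true]
  rw [chunks_eq _ (fun q hq => gsp_prefix _ u q hq)]
  rfl

theorem aFile_later (q1 : List Char) (q2 : List (List Char))
    (hdf : ("diff".toList) <+: q1)
    (h1 : '\n' ∉ q1) (h2 : ∀ x ∈ q2, '\n' ∉ x) :
    aFile ('\n' :: List.intercalate ['\n'] (q1 :: q2)) =
      pdClose (q1 :: (gsp "@@".toList q2).1)
        (((gsp "@@".toList q2).2.map (fun p => p.1 :: p.2)).reverse) false := by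
  rw [aFile, splitAt_char]
  rw [pdLines_newline_cons]
  rw [pdLines_join (q1 :: q2) (by simp) (by intro x hx; rcases List.mem_cons.1 hx with h|h
                                            · subst h; exact h1
                                            · exact h2 x h)]
  rw [regr_gsp _ (q1 :: q2).length (q1 :: q2) [] le_rfl]
  have hg : gsp "@@".toList (q1 :: q2) =
      (q1 :: (gsp "@@".toList q2).1, (gsp "@@".toList q2).2) := by
    simp only [gsp, diff_not_at q1 hdf, Bool.false_eq_true, if_false]
  rw [hg, pdClose]
  simp only [List.headD_cons, List.tail_cons, if_false]
  rw [chunks_eq _ (fun q hq => gsp_prefix _ q2 q hq)]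
  rfl

theorem main_equiv (diff : String) : parse_diff diff = parse_diff_alt diff := by
  rw [A_map]
  set l := diff.toList with hl
  have hNL : ∀ x ∈ pdLines l, '\n' ∉ x := pdLines_nl l [] (by simp)
  have hshape := pdLines_cons_shape l
  set l0 := (pdLines l).headD [] with hl0
  set ls := (pdLines l).tail with hls
  have hNL0 : '\n' ∉ l0 := hNL l0 (by rw [hshape]; simp)
  have hNLls : ∀ x ∈ ls, '\n' ∉ x := fun x hx =>
    hNL x (by rw [hshape]; exact List.mem_cons_of_mem _ hx)
  have hsplitD : PySem.Chars.splitOn l "\ndiff".toList = regr "diff".toList (pdLines l) := by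
    rw [show ("\ndiff".toList : List Char) = '\n' :: "diff".toList from rfl]
    rw [splitOn_eq_fsp, fsp_regr _ (by decide) l.length l [] le_rfl]; rfl
  rw [hsplitD, hshape, regr_gsp _ ls.length ls l0 le_rfl]
  simp only [List.headD_cons, List.tail_cons]
  -- LHS : ([join (l0::T)] ++ (GS.map f).map pref).map aFile
  rw [List.map_append, List.map_map, List.map_map]
  -- rewrite each later-file entry
  have hlater : ∀ q ∈ (gsp "diff".toList ls).2,
      ((aFile ∘ (fun fd => "\ndiff".toList ++ fd)) ∘
        (fun q => List.intercalate ['\n'] ((q.1.drop ("diff".toList).length) :: q.2))) q =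
      pdClose (q.1 :: (gsp "@@".toList q.2).1)
        (((gsp "@@".toList q.2).2.map (fun p => p.1 :: p.2)).reverse) false := by
    intro q hq
    have hpre : ("diff".toList) <+: q.1 := gsp_prefix _ ls q hq
    obtain ⟨hm1, hm2⟩ := gsp_mem2 "diff".toList ls q hq
    simp only [Function.comp]
    rw [show ("\ndiff".toList : List Char) = '\n' :: "diff".toList from rfl]
    rw [List.cons_append, pre_join _ _ _ hpre]
    exact aFile_later q.1 q.2 hpre (hNLls _ hm1) (fun x hx => hNLls x (hm2 x hx))
  rw [List.map_congr_left hlater]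
  -- first file
  have hfirst : aFile (List.intercalate ['\n'] (l0 :: (gsp "diff".toList ls).1)) =
      pdClose (l0 :: (gsp "@@".toList (gsp "diff".toList ls).1).1)
        (((gsp "@@".toList (gsp "diff".toList ls).1).2.map (fun p => p.1 :: p.2)).reverse) true :=
    aFile_core l0 _ hNL0 (fun x hx => hNLls x (gsp_mem1 _ ls x hx))
  rw [List.map_cons, List.map_nil, hfirst]
  -- RHS
  rw [parse_diff_alt]
  have hsplitN : PySem.Chars.splitOn l "\n".toList = pdLines l := by
    rw [show ("\n".toList : List Char) = '\n' :: ([] : List Char) from rfl]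
    rw [splitOn_eq_fsp]; rfl
  rw [hsplitN, hshape]
  simp only [List.headD_cons, List.tail_cons]
  conv_rhs => rw [gsp_decomp "diff".toList ls]
  rw [List.foldl_append]
  rw [inner_nil _ _ _ (fun x hx => gsp_clean1 "diff".toList ls x hx)]
  rw [outer _ _ _ _ (fun q hq =>
    ⟨List.isPrefixOf_iff_prefix.2 (gsp_prefix _ ls q hq),
     fun x hx => gsp_clean2 "diff".toList ls q hq x hx⟩)]
  simp only [List.nil_append, List.isEmpty_nil, List.singleton_append, List.cons_append]

-- ===== VERDICT =====
theorem parse_diff_spec : Claim_equal_parse_diff := by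
  intro diff _
  show parse_diff diff = parse_diff_alt diff
  exact main_equiv diff
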